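-- pv_equiv track=rewrite | github.com/davidilic/evaluating-gec-models | data/bea2019/preprocess_bea2019.py | process_edits
-- ===== SOURCE A (Python) =====
-- def process_edits(text: str, edits: list) -> str:
--     """
--     Apply edits to the text to create the corrected version.
--     """
--     chars = list(text)
--
--     all_individual_edits = []
--     for edit_group in edits:
--         start_pos = edit_group[0]
--         for edit in edit_group[1]:
--             all_individual_edits.append((start_pos + edit[0], start_pos + edit[1], edit[2]))
--
--     all_individual_edits.sort(key=lambda x: x[0], reverse=True)
--
--     for start, end, replacement in all_individual_edits:
--         if replacement is None:
--             chars[start:end] = []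
--         else:
--             chars[start:end] = list(replacement)
--
--     return ''.join(chars)
-- ===== SOURCE B (Python) =====
-- def _clamp(n, k):
--     """Resolve a Python slice bound against length n."""
--     if k < 0:
--         k += n
--     return 0 if k < 0 else (n if k > n else k)
--
--
-- def _splice(pieces, a, b, new):
--     """Replace positions [a, b) (0 <= a <= b) of the pieced-together text by
--     the string `new`, splitting pieces by index arithmetic only."""
--     res, right, pos = [], [], 0
--     for (s, i, j) in pieces:
--         l = j - i
--         cutl = min(max(a - pos, 0), l)   # part of this piece strictly before a
--         cutr = min(max(b - pos, 0), l)   # part of this piece strictly before b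
--         if cutl > 0:
--             res.append((s, i, i + cutl))
--         if cutr < l:
--             right.append((s, i + cutr, j))
--         pos += l
--     if new:
--         res.append((new, 0, len(new)))
--     res.extend(right)
--     return res
--
--
-- def process_edits(text: str, edits: list) -> str:
--     """
--     Apply edits to the text to create the corrected version.
--     Keeps the text as a piece table of (source, i, j) references, so each
--     edit is index arithmetic on pieces instead of splicing a char list;
--     the corrected string is materialised once at the end.
--     """
--     flat = [(g + a, g + b, r) for g, sub in edits for a, b, r in sub]
--     flat.sort(key=lambda x: x[0], reverse=True)
--     pieces = [(text, 0, len(text))]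
--     n = len(text)
--     for start, end, repl in flat:
--         a = _clamp(n, start)
--         b = max(a, _clamp(n, end))
--         new = repl if repl is not None else ''
--         pieces = _splice(pieces, a, b, new)
--         n += len(new) - (b - a)
--     return ''.join(s[i:j] for (s, i, j) in pieces)
-- ===== Notes on version B (the rewrite author's own statement) =====
-- stated objective: alternative
-- what changed: A materialises the text as a char list and rebuilds it with a Python slice assignment per edit; B keeps the text as a piece table of (source, i, j) references, resolves each edit's slice bounds against a tracked length, splits pieces by index arithmetic, and materialises the corrected string once at the end. Exact on every input, so no Pre_.
import Mathlib
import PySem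

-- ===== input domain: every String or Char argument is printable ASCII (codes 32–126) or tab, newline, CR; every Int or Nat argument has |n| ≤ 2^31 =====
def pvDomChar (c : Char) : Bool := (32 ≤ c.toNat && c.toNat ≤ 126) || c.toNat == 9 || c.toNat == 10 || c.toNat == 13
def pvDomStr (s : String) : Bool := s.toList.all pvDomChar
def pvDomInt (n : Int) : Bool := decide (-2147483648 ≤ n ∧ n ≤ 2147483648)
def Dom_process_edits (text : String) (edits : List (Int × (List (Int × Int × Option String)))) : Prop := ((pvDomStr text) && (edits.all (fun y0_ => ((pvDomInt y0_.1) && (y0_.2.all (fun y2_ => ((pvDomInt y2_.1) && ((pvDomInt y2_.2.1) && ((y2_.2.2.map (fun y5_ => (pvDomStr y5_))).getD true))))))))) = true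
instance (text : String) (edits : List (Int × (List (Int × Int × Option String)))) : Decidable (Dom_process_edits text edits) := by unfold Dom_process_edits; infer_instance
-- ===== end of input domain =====

-- B keeps the text as a piece table of (source, i, j) references spliced by index arithmetic
-- and materialised once, instead of A's per-edit char-list slice assignment (objective: alternative).


-- ===== PORT A =====
-- Python's list slice assignment `cs[a:b] = repl`: both bounds are resolved with the
-- slice rule (negative means from the end, then clamp into [0, len]); if the resolved
-- stop is before the resolved start the slice is empty and repl is inserted at the start.
-- Exact hand port (PySem has no slice-assignment primitive); PySem.List.clampIdx is the slice-bound rule.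
def pvSliceAssign (cs : List Char) (a b : Int) (repl : List Char) : List Char :=
  let a' := PySem.List.clampIdx cs.length a
  let b' := max a' (PySem.List.clampIdx cs.length b)
  cs.take a' ++ repl ++ cs.drop b'

def process_edits (text : String) (edits : List (Int × (List (Int × Int × Option String)))) : String :=
  let chars := text.toList
  let all_individual_edits : List (Int × Int × Option String) :=
    edits.foldl (fun acc g =>
      g.2.foldl (fun acc2 e => acc2 ++ [(g.1 + e.1, g.1 + e.2.1, e.2.2)]) acc) []
  let sortedEdits := PySem.List.sorted all_individual_edits (fun x => x.1) true
  let chars := sortedEdits.foldl (fun cs t =>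
      match t.2.2 with
      | none => pvSliceAssign cs t.1 t.2.1 []
      | some r => pvSliceAssign cs t.1 t.2.1 r.toList) chars
  String.ofList chars

-- ===== PORT B =====
-- Source B's _clamp: resolve a Python slice bound against length n (exact hand port of its arithmetic)
def pvClampB (n : Nat) (k : Int) : Nat :=
  let k' := if k < 0 then k + n else k
  if k' < 0 then 0 else if (n : Int) < k' then n else k'.toNat

-- Source B's _splice loop, as the obvious structural recursion over the same state
-- (res/right collected in piece order; pos advances by each piece's length;
-- Nat subtraction a - pos is exactly Python's max(a - pos, 0) here)
def pvSpliceGo (a b : Nat) : List (List Char × Nat × Nat) → Nat →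
    (List (List Char × Nat × Nat) × List (List Char × Nat × Nat))
  | [], _ => ([], [])
  | p :: ps, pos =>
      let l := p.2.2 - p.2.1
      let cutl := min (a - pos) l
      let cutr := min (b - pos) l
      let rest := pvSpliceGo a b ps (pos + l)
      ((if 0 < cutl then [(p.1, p.2.1, p.2.1 + cutl)] else []) ++ rest.1,
       (if cutr < l then [(p.1, p.2.1 + cutr, p.2.2)] else []) ++ rest.2)

def pvSplice (pieces : List (List Char × Nat × Nat)) (a b : Nat) (new : List Char) :
    List (List Char × Nat × Nat) :=
  let st := pvSpliceGo a b pieces 0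
  (st.1 ++ (if new.isEmpty then [] else [(new, 0, new.length)])) ++ st.2

def process_edits_alt (text : String) (edits : List (Int × (List (Int × Int × Option String)))) : String :=
  let flat : List (Int × Int × Option String) :=
    edits.flatMap (fun g => g.2.map (fun e => (g.1 + e.1, g.1 + e.2.1, e.2.2)))
  let flatS := PySem.List.sorted flat (fun x => x.1) true
  let T := text.toList
  let st := flatS.foldl (fun (st : List (List Char × Nat × Nat) × Nat) t =>
      let n := st.2
      let a := pvClampB n t.1
      let b := max a (pvClampB n t.2.1)
      let new := match t.2.2 with | none => [] | some r => r.toList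
      (pvSplice st.1 a b new, n + new.length - (b - a)))
    ([(T, 0, T.length)], T.length)
  String.ofList (st.1.flatMap (fun p => (p.1.drop p.2.1).take (p.2.2 - p.2.1)))

-- ===== PRECONDITION & SPEC =====
def Spec_process_edits (text : String) (edits : List (Int × (List (Int × Int × Option String)))) (out : String) : Prop := out = process_edits_alt text edits
instance (text : String) (edits : List (Int × (List (Int × Int × Option String)))) (out : String) : Decidable (Spec_process_edits text edits out) := by unfold Spec_process_edits; infer_instance

-- ===== CLAIM (what is proved, stated in full; the proofs are below) =====
def Claim_equal_process_edits : Prop := ∀ (text : String) (edits : List (Int × (List (Int × Int × Option String)))), Dom_process_edits text edits → Spec_process_edits text edits (process_edits text edits)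

-- ===== LEMMAS AND PROOFS =====

-- the flattened edit list (proof-side name for what both ports build)
def pvFlat (edits : List (Int × (List (Int × Int × Option String)))) : List (Int × Int × Option String) :=
  edits.flatMap (fun g => g.2.map (fun e => (g.1 + e.1, g.1 + e.2.1, e.2.2)))

-- a well-formed piece references a real substring of its source
def pvWf (ps : List (List Char × Nat × Nat)) : Prop :=
  ∀ p ∈ ps, p.2.1 ≤ p.2.2 ∧ p.2.2 ≤ p.1.length

-- the string a piece table denotes
def pvFlatten (ps : List (List Char × Nat × Nat)) : List Char :=
  ps.flatMap (fun p => (p.1.drop p.2.1).take (p.2.2 - p.2.1))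

theorem pvFlat_inner (g : Int) (l : List (Int × Int × Option String)) (acc : List (Int × Int × Option String)) :
    l.foldl (fun acc2 e => acc2 ++ [(g + e.1, g + e.2.1, e.2.2)]) acc
      = acc ++ l.map (fun e => (g + e.1, g + e.2.1, e.2.2)) := by
  induction l generalizing acc with
  | nil => simp
  | cons x xs ih => simp [List.foldl_cons, ih]

theorem pvFlat_eq (edits : List (Int × (List (Int × Int × Option String)))) (acc : List (Int × Int × Option String)) :
    edits.foldl (fun acc g =>
      g.2.foldl (fun acc2 e => acc2 ++ [(g.1 + e.1, g.1 + e.2.1, e.2.2)]) acc) acc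
      = acc ++ pvFlat edits := by
  induction edits generalizing acc with
  | nil => simp [pvFlat]
  | cons x xs ih =>
    simp only [List.foldl_cons]
    rw [pvFlat_inner, ih]
    simp [pvFlat]

theorem pvClampB_eq (n : Nat) (k : Int) : pvClampB n k = PySem.List.clampIdx n k := by
  simp only [pvClampB, PySem.List.clampIdx]
  split_ifs <;> omega

theorem pvSeg_length (p : List Char × Nat × Nat) (h2 : p.2.2 ≤ p.1.length) :
    ((p.1.drop p.2.1).take (p.2.2 - p.2.1)).length = p.2.2 - p.2.1 := by
  simp
  omega

theorem pvSpliceGo_spec (a b : Nat) (ps : List (List Char × Nat × Nat)) :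
    ∀ pos : Nat, pvWf ps →
      pvFlatten (pvSpliceGo a b ps pos).1 = (pvFlatten ps).take (a - pos) ∧
      pvFlatten (pvSpliceGo a b ps pos).2 = (pvFlatten ps).drop (b - pos) := by
  induction ps with
  | nil => intro pos _; simp [pvSpliceGo, pvFlatten]
  | cons p ps ih =>
    intro pos hwf
    obtain ⟨h1, h2⟩ := hwf p (by simp)
    have hwf' : pvWf ps := fun q hq => hwf q (by simp [hq])
    obtain ⟨ihl, ihr⟩ := ih (pos + (p.2.2 - p.2.1)) hwf'
    have hseg := pvSeg_length p h2
    have hariA : a - (pos + (p.2.2 - p.2.1)) = (a - pos) - (p.2.2 - p.2.1) := by omega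
    have hariB : b - (pos + (p.2.2 - p.2.1)) = (b - pos) - (p.2.2 - p.2.1) := by omega
    constructor
    · simp only [pvSpliceGo, pvFlatten, List.flatMap_cons, List.flatMap_append]
      rw [List.take_append]
      simp only [pvFlatten] at ihl
      rw [hseg, ihl, hariA]
      congr 1
      by_cases hc : 0 < min (a - pos) (p.2.2 - p.2.1)
      · rw [if_pos hc]
        simp only [List.flatMap_cons, List.flatMap_nil, List.append_nil]
        rw [List.take_take]
        congr 1
        omega
      · rw [if_neg hc]
        simp only [List.flatMap_nil]
        have hlen0 : (((p.1.drop p.2.1).take (p.2.2 - p.2.1)).take (a - pos)).length = 0 := by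
          rw [List.length_take, hseg]
          omega
        exact (List.eq_nil_of_length_eq_zero hlen0).symm
    · simp only [pvSpliceGo, pvFlatten, List.flatMap_cons, List.flatMap_append]
      rw [List.drop_append]
      simp only [pvFlatten] at ihr
      rw [hseg, ihr, hariB]
      congr 1
      by_cases hc : min (b - pos) (p.2.2 - p.2.1) < p.2.2 - p.2.1
      · have hmin : min (b - pos) (p.2.2 - p.2.1) = b - pos := by omega
        rw [if_pos hc, hmin]
        simp only [List.flatMap_cons, List.flatMap_nil, List.append_nil]
        rw [List.drop_take, List.drop_drop]
        congr 1
        omega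
      · rw [if_neg hc]
        simp only [List.flatMap_nil]
        have hlen0 : (((p.1.drop p.2.1).take (p.2.2 - p.2.1)).drop (b - pos)).length = 0 := by
          rw [List.length_drop, hseg]
          omega
        exact (List.eq_nil_of_length_eq_zero hlen0).symm

theorem pvSpliceGo_wf (a b : Nat) (ps : List (List Char × Nat × Nat)) :
    ∀ pos : Nat, pvWf ps →
      pvWf (pvSpliceGo a b ps pos).1 ∧ pvWf (pvSpliceGo a b ps pos).2 := by
  induction ps with
  | nil => intro pos _; constructor <;> intro q hq <;> simp [pvSpliceGo] at hq
  | cons p ps ih =>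
    intro pos hwf
    obtain ⟨h1, h2⟩ := hwf p (by simp)
    obtain ⟨ihl, ihr⟩ := ih (pos + (p.2.2 - p.2.1)) (fun q hq => hwf q (by simp [hq]))
    constructor
    · intro q hq
      simp only [pvSpliceGo, List.mem_append] at hq
      rcases hq with hq | hq
      · rcases (by split_ifs at hq <;> simp_all : q = (p.1, p.2.1, p.2.1 + min (a - pos) (p.2.2 - p.2.1))) with rfl
        constructor <;> simp <;> omega
      · exact ihl q hq
    · intro q hq
      simp only [pvSpliceGo, List.mem_append] at hq
      rcases hq with hq | hq
      · rcases (by split_ifs at hq <;> simp_all : q = (p.1, p.2.1 + min (b - pos) (p.2.2 - p.2.1), p.2.2)) with rfl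
        constructor <;> simp <;> omega
      · exact ihr q hq

theorem pvSplice_flatten (ps : List (List Char × Nat × Nat)) (a b : Nat) (new : List Char)
    (hwf : pvWf ps) :
    pvFlatten (pvSplice ps a b new) = (pvFlatten ps).take a ++ new ++ (pvFlatten ps).drop b := by
  obtain ⟨hl, hr⟩ := pvSpliceGo_spec a b ps 0 hwf
  simp only [pvSplice, pvFlatten, List.flatMap_append] at *
  rw [hl, hr]
  simp only [Nat.sub_zero]
  congr 1
  congr 1
  cases new <;> simp

theorem pvSplice_wf (ps : List (List Char × Nat × Nat)) (a b : Nat) (new : List Char)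
    (hwf : pvWf ps) : pvWf (pvSplice ps a b new) := by
  obtain ⟨hl, hr⟩ := pvSpliceGo_wf a b ps 0 hwf
  intro q hq
  simp only [pvSplice, List.mem_append] at hq
  rcases hq with (hq | hq) | hq
  · exact hl q hq
  · rcases (by split_ifs at hq <;> simp_all : q = (new, 0, new.length)) with rfl
    simp
  · exact hr q hq

theorem pvClampB_le (n : Nat) (k : Int) : pvClampB n k ≤ n := by
  simp only [pvClampB]
  split_ifs <;> omega

-- one step: A's slice assignment on the flattened text = B's piece splice, flattened
theorem pvStep_eq (pieces : List (List Char × Nat × Nat)) (n : Nat) (t : Int × Int × Option String)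
    (hwf : pvWf pieces) (hn : (pvFlatten pieces).length = n) :
    (match t.2.2 with
      | none => pvSliceAssign (pvFlatten pieces) t.1 t.2.1 []
      | some r => pvSliceAssign (pvFlatten pieces) t.1 t.2.1 r.toList)
      = pvFlatten (pvSplice pieces (pvClampB n t.1)
          (max (pvClampB n t.1) (pvClampB n t.2.1))
          (match t.2.2 with | none => [] | some r => r.toList)) := by
  have key : ∀ repl : List Char,
      pvSliceAssign (pvFlatten pieces) t.1 t.2.1 repl
        = pvFlatten (pvSplice pieces (pvClampB n t.1)
            (max (pvClampB n t.1) (pvClampB n t.2.1)) repl) := by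
    intro repl
    rw [pvSplice_flatten pieces _ _ repl hwf]
    simp only [pvSliceAssign, hn, pvClampB_eq]
  cases t.2.2 <;> simpa using key _

theorem pvStep_len (pieces : List (List Char × Nat × Nat)) (a b : Nat) (new : List Char)
    (hwf : pvWf pieces) (hab : a ≤ b) (hb : b ≤ (pvFlatten pieces).length) :
    (pvFlatten (pvSplice pieces a b new)).length
      = (pvFlatten pieces).length + new.length - (b - a) := by
  rw [pvSplice_flatten pieces a b new hwf]
  simp
  omega

-- the whole loop: folding A's slice assignments over the flattened text equals
-- folding B's piece splices and flattening at the end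
theorem pvFold_eq (L : List (Int × Int × Option String)) :
    ∀ (pieces : List (List Char × Nat × Nat)) (n : Nat),
      pvWf pieces → (pvFlatten pieces).length = n →
      (L.foldl (fun cs t =>
          match t.2.2 with
          | none => pvSliceAssign cs t.1 t.2.1 []
          | some r => pvSliceAssign cs t.1 t.2.1 r.toList) (pvFlatten pieces))
        = pvFlatten (L.foldl (fun (st : List (List Char × Nat × Nat) × Nat) t =>
            let n := st.2
            let a := pvClampB n t.1
            let b := max a (pvClampB n t.2.1)
            let new := match t.2.2 with | none => [] | some r => r.toList
            (pvSplice st.1 a b new, n + new.length - (b - a))) (pieces, n)).1 := by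
  induction L with
  | nil => intro pieces n _ _; simp
  | cons t L ih =>
    intro pieces n hwf hn
    simp only [List.foldl_cons]
    set a := pvClampB n t.1 with ha
    set b := max a (pvClampB n t.2.1) with hb
    set new := (match t.2.2 with | none => [] | some r => r.toList) with hnew
    have hab : a ≤ b := le_max_left _ _
    have hbn : b ≤ (pvFlatten pieces).length := by
      rw [hn]; exact max_le (pvClampB_le n t.1) (pvClampB_le n t.2.1)
    have hstep := pvStep_eq pieces n t hwf hn
    rw [hstep]
    exact ih (pvSplice pieces a b new) (n + new.length - (b - a))
      (pvSplice_wf pieces a b new hwf)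
      (by rw [pvStep_len pieces a b new hwf hab hbn, hn])

-- ===== VERDICT (by name: the statement is the Claim_ definition above) =====
theorem process_edits_spec : Claim_equal_process_edits := by
  intro text edits _
  unfold Spec_process_edits process_edits process_edits_alt
  dsimp only
  rw [pvFlat_eq edits [], List.nil_append]
  have hBflat : List.flatMap (fun (g : Int × List (Int × Int × Option String)) =>
      List.map (fun e => (g.1 + e.1, g.1 + e.2.1, e.2.2)) g.2) edits = pvFlat edits := rfl
  rw [hBflat]
  set T := text.toList with hT
  set L := PySem.List.sorted (pvFlat edits) (fun x => x.1) true with hL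
  have hwf0 : pvWf [(T, 0, T.length)] := by
    intro p hp
    simp at hp
    subst hp
    simp
  have hfl0 : pvFlatten [(T, 0, T.length)] = T := by
    simp [pvFlatten]
  have := pvFold_eq L [(T, 0, T.length)] T.length hwf0 (by rw [hfl0])
  rw [hfl0] at this
  rw [this]
  rfl
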